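-- pv_equiv track=rewrite | github.com/informalsystems/modelator-py | modelator/util/parse/tlc_stdout.py | extract_traces
-- ===== SOURCE A (Python) =====
-- def extract_traces(stdout: str) -> list[str]:
--     """
--     Extract zero, one or more traces from the stdout of TLC.
--
--     Note: Does not support lasso traces
--     """
--     ret = []
--     lines = stdout.split("\n")
--     HEADER = "Error: Invariant"
--     FOOTER = "Model checking completed."
--     header_cnt = 0
--     header_ix = -1
--     for i, line in enumerate(lines):
--         if line.startswith(HEADER) or line.startswith(FOOTER):
--             if 0 < header_cnt:
--                 trace_lines = lines[header_ix + 2 : i]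
--                 trace = "\n".join(trace_lines)
--                 ret.append(trace)
--             header_cnt += 1
--             header_ix = i
--     return ret
-- ===== SOURCE B (Python) =====
-- def extract_traces(stdout: str) -> list[str]:
--     """
--     Extract zero, one or more traces from the stdout of TLC.
--
--     Segment-splitting formulation: repeatedly cut the remaining line list at
--     the next marker line; each segment strictly between two markers, minus its
--     first line, is one trace.  No line indices are ever computed.
--     """
--     HEADER = "Error: Invariant"
--     FOOTER = "Model checking completed."
--
--     def split_at_marker(lines):
--         """(lines before the first marker, lines after it), or None if no marker."""
--         segment = []
--         for j, line in enumerate(lines):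
--             if line.startswith(HEADER) or line.startswith(FOOTER):
--                 return segment, lines[j + 1:]
--             segment.append(line)
--         return None
--
--     cut = split_at_marker(stdout.split("\n"))
--     if cut is None:
--         return []
--     rest = cut[1]
--     ret = []
--     while (cut := split_at_marker(rest)) is not None:
--         segment, rest = cut
--         ret.append("\n".join(segment[1:]))
--     return ret
-- ===== Notes on version B (the rewrite author's own statement) =====
-- stated objective: alternative
-- what changed: Replaces A's single pass with running header_cnt/header_ix counters and global index slicing by repeated segment-splitting: a helper cuts the remaining line list at the next marker, and each inner segment minus its first line is joined into a trace; no line indices into the full list are kept.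
import Mathlib
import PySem

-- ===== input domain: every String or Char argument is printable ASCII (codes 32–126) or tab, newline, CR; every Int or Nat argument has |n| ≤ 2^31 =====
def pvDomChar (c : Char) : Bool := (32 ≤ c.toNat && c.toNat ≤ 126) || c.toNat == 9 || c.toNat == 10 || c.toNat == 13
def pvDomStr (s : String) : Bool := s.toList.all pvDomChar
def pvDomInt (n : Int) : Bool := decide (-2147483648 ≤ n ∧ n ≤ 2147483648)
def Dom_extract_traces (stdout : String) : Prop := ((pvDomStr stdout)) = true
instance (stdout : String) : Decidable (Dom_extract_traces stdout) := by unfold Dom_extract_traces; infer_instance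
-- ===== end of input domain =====

-- B replaces A's indexed single pass (running header_cnt/header_ix, slices of the full
-- line list) by repeated segment-splitting at the next marker (objective: alternative).

-- ===== PORT A =====
-- the loop body of A, step for step (line is a marker ↦ maybe append trace, bump count, remember index)
def pvStepA (lines : List String) (s : List String × Int × Int) (p : Int × String) :
    List String × Int × Int :=
  let (ret, header_cnt, header_ix) := s
  let (i, line) := p
  if PySem.Str.startswith line "Error: Invariant" ||
     PySem.Str.startswith line "Model checking completed." then
    let ret := if 0 < header_cnt then
        ret ++ [PySem.Str.join "\n" (PySem.List.slice lines (some (header_ix + 2)) (some i))]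
      else ret
    (ret, header_cnt + 1, i)
  else s

def extract_traces (stdout : String) : List String :=
  let lines := (PySem.Str.split? stdout "\n").getD []
  ((PySem.List.enumerate lines 0).foldl (pvStepA lines) ([], 0, -1)).1

-- ===== PORT B =====
def pvIsMark (line : String) : Bool :=
  PySem.Str.startswith line "Error: Invariant" ||
  PySem.Str.startswith line "Model checking completed."

-- split_at_marker: scan, accumulating the segment before the first marker;
-- on the marker return (segment, lines after the marker), at the end None
def pvSplit : List String → Option (List String × List String)
  | [] => none
  | l :: ls =>
    if pvIsMark l then some ([], ls)
    else (pvSplit ls).map (fun c => (l :: c.1, c.2))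

-- the split-off rest is strictly shorter (termination of the while loop below)
theorem pvSplit_length : ∀ (rest seg rest' : List String),
    pvSplit rest = some (seg, rest') → rest'.length < rest.length := by
  intro rest
  induction rest with
  | nil => intro seg rest' h; simp [pvSplit] at h
  | cons l ls ih =>
    intro seg rest' h
    by_cases hm : pvIsMark l = true
    · simp [pvSplit, hm] at h
      simp [← h.2]
    · cases hs : pvSplit ls with
      | none => rw [pvSplit, if_neg hm, hs] at h; simp at h
      | some c =>
        rw [pvSplit, if_neg hm, hs] at h
        simp at h
        have := ih c.1 c.2 (by rw [hs])
        simp [← h.2]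
        omega

-- the while loop: cut at the next marker, drop the segment's first line, join, repeat
def pvTracesLoop (ret rest : List String) : List String :=
  match h : pvSplit rest with
  | none => ret
  | some c =>
    pvTracesLoop (ret ++ [PySem.Str.join "\n" (PySem.List.slice c.1 (some 1) none)]) c.2
termination_by rest.length
decreasing_by exact pvSplit_length rest c.1 c.2 h

def extract_traces_alt (stdout : String) : List String :=
  let lines := (PySem.Str.split? stdout "\n").getD []
  match pvSplit lines with
  | none => []
  | some c => pvTracesLoop [] c.2

-- ===== PRECONDITION & SPEC =====
def Spec_extract_traces (stdout : String) (out : List String) : Prop := out = extract_traces_alt stdout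
instance (stdout : String) (out : List String) : Decidable (Spec_extract_traces stdout out) := by unfold Spec_extract_traces; infer_instance

-- ===== CLAIM (what is proved, stated in full; the proofs are below) =====
def Claim_equal_extract_traces : Prop := ∀ (stdout : String), Dom_extract_traces stdout → Spec_extract_traces stdout (extract_traces stdout)

-- ===== LEMMAS AND PROOFS =====

-- A's step, with its marker test folded into pvIsMark (definitional)
theorem pvStepA_eq (lines : List String) (s : List String × Int × Int) (p : Int × String) :
    pvStepA lines s p =
      if pvIsMark p.2 then
        (if 0 < s.2.1 then
            s.1 ++ [PySem.Str.join "\n" (PySem.List.slice lines (some (s.2.2 + 2)) (some p.1))]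
          else s.1, s.2.1 + 1, p.1)
      else s := rfl

theorem pvTracesLoop_none {rest : List String} (ret : List String)
    (h : pvSplit rest = none) : pvTracesLoop ret rest = ret := by
  rw [pvTracesLoop]; split <;> simp_all

theorem pvTracesLoop_some {rest : List String} (ret : List String) {c : List String × List String}
    (h : pvSplit rest = some c) :
    pvTracesLoop ret rest =
      pvTracesLoop (ret ++ [PySem.Str.join "\n" (PySem.List.slice c.1 (some 1) none)]) c.2 := by
  rw [pvTracesLoop]; split <;> simp_all

-- pvSplit = none exactly when no line is a marker
theorem pvSplit_none {rest : List String} (h : pvSplit rest = none) :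
    ∀ l ∈ rest, pvIsMark l = false := by
  induction rest with
  | nil => simp
  | cons l ls ih =>
    by_cases hm : pvIsMark l = true
    · simp [pvSplit, hm] at h
    · rw [pvSplit, if_neg hm, Option.map_eq_none_iff] at h
      intro x hx
      rcases List.mem_cons.mp hx with hx | hx
      · rw [hx]; simpa using hm
      · exact ih h x hx

-- pvSplit decomposes the list around the first marker
theorem pvSplit_some : ∀ {rest seg rest' : List String},
    pvSplit rest = some (seg, rest') →
    ∃ mk, rest = seg ++ mk :: rest' ∧ pvIsMark mk = true ∧ ∀ l ∈ seg, pvIsMark l = false := by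
  intro rest
  induction rest with
  | nil => intro seg rest' h; simp [pvSplit] at h
  | cons l ls ih =>
    intro seg rest' h
    by_cases hm : pvIsMark l = true
    · simp [pvSplit, hm] at h
      obtain ⟨h1, h2⟩ := h
      subst h1 h2
      exact ⟨l, rfl, hm, by simp⟩
    · cases hs : pvSplit ls with
      | none => rw [pvSplit, if_neg hm, hs, Option.map_none] at h; cases h
      | some c =>
        rw [pvSplit, if_neg hm, hs] at h
        simp at h
        obtain ⟨mk, he, hmk, hseg⟩ := ih (show pvSplit ls = some (c.1, c.2) by rw [hs])
        refine ⟨mk, by simp [← h.1, ← h.2, he], hmk, ?_⟩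
        intro x hx
        rcases (by simpa [← h.1] using hx : x = l ∨ x ∈ c.1) with hx | hx
        · simp [hx]; simpa using hm
        · exact hseg x hx

-- A's loop ignores non-marker lines
theorem pvFoldl_skip (lines : List String) : ∀ (seg : List String),
    (∀ l ∈ seg, pvIsMark l = false) → ∀ (s : List String × Int × Int) (k : Int),
    (PySem.List.enumerate seg k).foldl (pvStepA lines) s = s := by
  intro seg
  induction seg with
  | nil => intro _ s k; simp [PySem.List.enumerate_nil]
  | cons l ls ih =>
    intro h s k
    have hl : pvIsMark l = false := h l (by simp)
    rw [PySem.List.enumerate_cons, List.foldl_cons, pvStepA_eq]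
    simp only [hl, Bool.false_eq_true, if_false]
    exact ih (fun x hx => h x (by simp [hx])) s (k + 1)

-- positive phase: after a marker at index pre.length - 1, A's loop over the remaining
-- lines produces exactly B's while loop on those lines
theorem pvPos : ∀ (n : Nat) (rest : List String), rest.length ≤ n →
    ∀ (pre ret : List String) (c : Int), 0 < c →
    ((PySem.List.enumerate rest ((pre.length : Int))).foldl (pvStepA (pre ++ rest))
      (ret, c, (pre.length : Int) - 1)).1 = pvTracesLoop ret rest := by
  intro n
  induction n with
  | zero =>
    intro rest hn pre ret c hc
    have : rest = [] := List.length_eq_zero_iff.mp (Nat.le_zero.mp hn)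
    subst this
    rw [pvTracesLoop_none ret (by rw [pvSplit])]
    simp [PySem.List.enumerate_nil]
  | succ n ih =>
    intro rest hn pre ret c hc
    cases h : pvSplit rest with
    | none =>
      rw [pvFoldl_skip _ rest (pvSplit_none h), pvTracesLoop_none ret h]
    | some cut =>
      obtain ⟨seg, rest'⟩ := cut
      obtain ⟨mk, he, hmk, hseg⟩ := pvSplit_some h
      subst he
      rw [PySem.List.enumerate_append, List.foldl_append]
      rw [pvFoldl_skip _ seg hseg]
      rw [PySem.List.enumerate_cons, List.foldl_cons, pvStepA_eq]
      simp only [hmk, hc, if_pos]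
      -- the slice of the full list is the segment without its first line
      have hslice : PySem.List.slice (pre ++ (seg ++ mk :: rest'))
          (some ((pre.length : Int) - 1 + 2)) (some ((pre.length : Int) + seg.length)) =
          seg.drop 1 := by
        have h1 : (pre.length : Int) - 1 + 2 = ((pre.length + 1 : Nat) : Int) := by push_cast; ring
        have h2 : (pre.length : Int) + seg.length = ((pre.length + seg.length : Nat) : Int) := by
          push_cast; ring
        rw [h1, h2, PySem.List.slice_natCast]
        cases seg with
        | nil => simp
        | cons a s =>
          have hd : (pre ++ (a :: s ++ mk :: rest')).drop (pre.length + 1) =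
              s ++ mk :: rest' := by
            rw [← List.drop_drop, List.drop_left]
            rfl
          rw [hd]
          have h3 : pre.length + (a :: s).length - (pre.length + 1) = s.length := by
            simp; omega
          rw [h3, List.take_left' rfl]
          rfl
      -- recurse with the new prefix pre ++ seg ++ [mk]
      have hlen : rest'.length ≤ n := by
        have := pvSplit_length _ _ _ h
        simp only [List.length_append, List.length_cons] at this hn
        omega
      have hrec := ih rest' hlen (pre ++ seg ++ [mk])
        (ret ++ [PySem.Str.join "\n" (seg.drop 1)]) (c + 1) (by omega)
      have hpre : (((pre ++ seg ++ [mk]).length : Nat) : Int) =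
          (pre.length : Int) + seg.length + 1 := by
        simp only [List.length_append, List.length_cons, List.length_nil]
        push_cast; ring
      rw [hpre] at hrec
      have hl : pre ++ seg ++ [mk] ++ rest' = pre ++ (seg ++ mk :: rest') := by simp
      rw [hl] at hrec
      have harg : (pre.length : Int) + seg.length + 1 - 1 = (pre.length : Int) + seg.length := by
        ring
      rw [harg] at hrec
      rw [hslice, hrec, pvTracesLoop_some ret h]
      congr 3
      rw [PySem.List.slice_from_one]
      cases seg <;> simp

-- zero phase: before the first marker A's loop only finds it, appending nothing
theorem pvZero : ∀ (rest pre ret : List String),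
    ((PySem.List.enumerate rest ((pre.length : Int))).foldl (pvStepA (pre ++ rest))
      (ret, 0, -1)).1 =
      match pvSplit rest with
      | none => ret
      | some c => pvTracesLoop ret c.2 := by
  intro rest pre ret
  cases h : pvSplit rest with
  | none =>
    rw [pvFoldl_skip _ rest (pvSplit_none h)]
  | some cut =>
    obtain ⟨seg, rest'⟩ := cut
    obtain ⟨mk, he, hmk, hseg⟩ := pvSplit_some h
    subst he
    rw [PySem.List.enumerate_append, List.foldl_append]
    rw [pvFoldl_skip _ seg hseg]
    rw [PySem.List.enumerate_cons, List.foldl_cons, pvStepA_eq]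
    simp only [hmk, if_true]
    rw [if_neg (by omega)]
    have hrec := pvPos rest'.length rest' (le_refl _) (pre ++ seg ++ [mk]) ret 1 (by omega)
    have hpre : (((pre ++ seg ++ [mk]).length : Nat) : Int) =
        (pre.length : Int) + seg.length + 1 := by
      simp only [List.length_append, List.length_cons, List.length_nil]
      push_cast; ring
    rw [hpre] at hrec
    have hl : pre ++ seg ++ [mk] ++ rest' = pre ++ (seg ++ mk :: rest') := by simp
    rw [hl] at hrec
    have harg : (pre.length : Int) + seg.length + 1 - 1 = (pre.length : Int) + seg.length := by
      ring
    rw [harg] at hrec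
    exact hrec

-- ===== VERDICT (by name: the statement is the Claim_ definition above) =====
theorem extract_traces_spec : Claim_equal_extract_traces := by
  intro stdout _
  unfold Spec_extract_traces
  simp only [extract_traces, extract_traces_alt]
  have := pvZero ((PySem.Str.split? stdout "\n").getD []) [] []
  simp only [List.length_nil, Nat.cast_zero, List.nil_append] at this
  exact this
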